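-- pv_equiv track=rewrite | github.com/KimonSenpai/Materials-Maria | 19-833.py | f
-- ===== SOURCE A (Python) =====
-- def move(a, b):
--     aa = [a // 10, a % 10]
--     bb = [b // 10, b % 10]
--
--     res = []
--
--     for da in aa:
--         for db in bb:
--             na = da*10 + db
--             nb = db*10 + da
--
--             if na < a:
--                 res += [(na, b)]
--             if nb < b:
--                 res += [(a, nb)]
--     return res
--
-- def go(a, b):
--     return [f(*e) for e in move(a, b)]
--
-- def f(a, b):
--     if len(move(a, b)) == 0:
--         return -0
--
--     mas = go(a, b)
--
--     if all(v > 0 for v in mas):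
--         return -max(mas) - 1
--     else:
--         return -max(v for v in mas if v <= 0) + 1
-- ===== SOURCE B (Python) =====
-- def f(a, b):
--     # Memoized DP over the (a, b) game states instead of A's naive
--     # exponential recursion; exact same values on nonnegative inputs.
--     memo = {}
--
--     def children(a, b):
--         out = []
--         for da in (a // 10, a % 10):
--             for db in (b // 10, b % 10):
--                 if da * 10 + db < a:
--                     out.append((da * 10 + db, b))
--                 if db * 10 + da < b:
--                     out.append((a, db * 10 + da))
--         return out
--
--     def value(a, b):
--         key = (a, b)
--         if key in memo:
--             return memo[key]
--         kids = children(a, b)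
--         if not kids:
--             res = 0
--         else:
--             vals = [value(x, y) for x, y in kids]
--             neg = [v for v in vals if v <= 0]
--             res = 1 - max(neg) if neg else -1 - max(vals)
--         memo[key] = res
--         return res
--
--     return value(a, b)
-- ===== Notes on version B (the rewrite author's own statement) =====
-- stated objective: faster
-- what changed: B memoizes the game value over (a,b) states in a dictionary (top-down DP), so each state is evaluated once instead of A's naive exponential recursion re-exploring the whole move tree; Pre_ excludes negative components, where both recursions descend forever and raise RecursionError.
import Mathlib
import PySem

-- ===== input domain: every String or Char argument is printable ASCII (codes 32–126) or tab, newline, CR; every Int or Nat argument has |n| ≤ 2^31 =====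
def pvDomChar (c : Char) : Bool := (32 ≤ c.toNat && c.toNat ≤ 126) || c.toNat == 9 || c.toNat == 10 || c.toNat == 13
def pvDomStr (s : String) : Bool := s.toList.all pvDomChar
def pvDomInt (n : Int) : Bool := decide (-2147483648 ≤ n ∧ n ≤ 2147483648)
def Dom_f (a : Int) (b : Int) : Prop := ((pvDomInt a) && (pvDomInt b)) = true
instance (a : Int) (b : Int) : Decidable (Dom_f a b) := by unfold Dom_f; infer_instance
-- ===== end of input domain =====

-- B replaces A's naive exponential game recursion by a memoized (dictionary) DP over the
-- (a,b) states — each state evaluated once; asymptotically faster, same values on Pre_.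

-- ===== PORT A =====
-- Python's move(a, b): nested loops over the two digit lists, appending to res.
def moveA (a : Int) (b : Int) : List (Int × Int) :=
  let aa : List Int := [PySem.Int.floordiv a 10, PySem.Int.mod a 10]
  let bb : List Int := [PySem.Int.floordiv b 10, PySem.Int.mod b 10]
  aa.foldl (fun res da =>
    bb.foldl (fun res db =>
      let na := da * 10 + db
      let nb := db * 10 + da
      let res := if na < a then res ++ [(na, b)] else res
      let res := if nb < b then res ++ [(a, nb)] else res
      res) res) []

-- A's mutual recursion f/go, made total with a fuel counter (the only change: Python's
-- recursion has no fuel; with fuel (a+b).toNat + 1 the fuel never runs out on Pre_f).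
def fFuel : Nat → Int → Int → Int
  | 0, _, _ => 0   -- fuel exhausted: unreachable for inputs satisfying Pre_f
  | fuel + 1, a, b =>
    if (moveA a b).length = 0 then 0   -- Python's -0
    else
      -- go(a, b) = [f(*e) for e in move(a, b)]
      let mas := (moveA a b).map (fun e => fFuel fuel e.1 e.2)
      if mas.all (fun v => decide (v > 0)) then
        -((PySem.List.max? mas (fun v => v)).getD 0) - 1
      else
        -((PySem.List.max? (mas.filter (fun v => decide (v ≤ 0))) (fun v => v)).getD 0) + 1

def f (a : Int) (b : Int) : Int := fFuel ((a + b).toNat + 1) a b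

-- ===== PORT B =====
-- children(a, b): list-comprehension style over the four digit pairs.
def childrenB (a : Int) (b : Int) : List (Int × Int) :=
  ([PySem.Int.floordiv a 10, PySem.Int.mod a 10]).flatMap (fun da =>
    ([PySem.Int.floordiv b 10, PySem.Int.mod b 10]).flatMap (fun db =>
      (if da * 10 + db < a then [(da * 10 + db, b)] else []) ++
      (if db * 10 + da < b then [(a, db * 10 + da)] else [])))

-- value(a, b) with the memo dictionary threaded through (top-down DP); fuel is the
-- totality guard exactly as in port A.
def valueB : Nat → Int → Int → PySem.Dict (Int × Int) Int →
    Int × PySem.Dict (Int × Int) Int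
  | 0, _, _, memo => (0, memo)   -- fuel exhausted: unreachable for inputs satisfying Pre_f
  | fuel + 1, a, b, memo =>
    match PySem.Dict.get? memo (a, b) with
    | some v => (v, memo)
    | none =>
      let kids := childrenB a b
      let (res, m) :=
        if kids = [] then (0, memo)
        else
          let (vals, m) := kids.foldl
            (fun (acc : List Int × PySem.Dict (Int × Int) Int) e =>
              let r := valueB fuel e.1 e.2 acc.2
              (acc.1 ++ [r.1], r.2)) ([], memo)
          let neg := vals.filter (fun v => decide (v ≤ 0))
          (if neg ≠ [] then 1 - (PySem.List.max? neg (fun v => v)).getD 0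
           else -1 - (PySem.List.max? vals (fun v => v)).getD 0, m)
      (res, PySem.Dict.insert m (a, b) res)

def f_alt (a : Int) (b : Int) : Int :=
  (valueB ((a + b).toNat + 1) a b PySem.Dict.empty).1

-- ===== PRECONDITION & SPEC =====
-- On a < 0 or b < 0 the Python A recurses down an infinite chain of ever smaller states
-- and raises RecursionError (B does too), so exactly those inputs are excluded.
def Pre_f (a : Int) (b : Int) : Prop := 0 ≤ a ∧ 0 ≤ b
instance (a : Int) (b : Int) : Decidable (Pre_f a b) := by unfold Pre_f; infer_instance
def pvWitness_f : Int × Int := (12, 34)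

def Spec_f (a : Int) (b : Int) (out : Int) : Prop := out = f_alt a b
instance (a : Int) (b : Int) (out : Int) : Decidable (Spec_f a b out) := by unfold Spec_f; infer_instance

-- ===== CLAIM (what is proved, stated in full; the proofs are below) =====
def Claim_equal_f : Prop := ∀ (a : Int) (b : Int), Dom_f a b → Pre_f a b → Spec_f a b (f a b)

-- ===== LEMMAS AND PROOFS =====

-- Every move goes to a state with the same second (resp. first) component and a strictly
-- smaller other component; from a nonnegative state all moves stay nonnegative.
-- one body of A's inner loop, rewritten as "append a two-chunk block"
theorem step (a b da db : Int) (res : List (Int × Int)) :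
    (if db * 10 + da < b then
       (if da * 10 + db < a then res ++ [(da * 10 + db, b)] else res) ++ [(a, db * 10 + da)]
     else (if da * 10 + db < a then res ++ [(da * 10 + db, b)] else res))
    = res ++ ((if da * 10 + db < a then [(da * 10 + db, b)] else []) ++
              (if db * 10 + da < b then [(a, db * 10 + da)] else [])) := by
  split_ifs <;> simp

theorem mem_moveA {a b x y : Int} (h : (x, y) ∈ moveA a b) :
    (x < a ∧ y = b) ∨ (x = a ∧ y < b) := by
  simp only [moveA, List.foldl_cons, List.foldl_nil] at h
  generalize PySem.Int.floordiv a 10 = p at h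
  generalize PySem.Int.mod a 10 = q at h
  generalize PySem.Int.floordiv b 10 = r at h
  generalize PySem.Int.mod b 10 = s at h
  simp only [step] at h
  simp only [List.mem_append, List.nil_append, List.mem_ite_nil_right,
    List.mem_singleton, Prod.mk.injEq] at h
  omega

theorem mem_moveA_nonneg {a b x y : Int} (ha : 0 ≤ a) (hb : 0 ≤ b)
    (h : (x, y) ∈ moveA a b) : 0 ≤ x ∧ 0 ≤ y := by
  have hda : 0 ≤ PySem.Int.floordiv a 10 := by
    have h1 := PySem.Int.floordiv_mul_add_mod a 10
    have h2 := PySem.Int.mod_nonneg a (b := 10) (by omega)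
    have h3 := PySem.Int.mod_lt a (b := 10) (by omega)
    nlinarith
  have hdb : 0 ≤ PySem.Int.floordiv b 10 := by
    have h1 := PySem.Int.floordiv_mul_add_mod b 10
    have h2 := PySem.Int.mod_nonneg b (b := 10) (by omega)
    have h3 := PySem.Int.mod_lt b (b := 10) (by omega)
    nlinarith
  have hma : 0 ≤ PySem.Int.mod a 10 := PySem.Int.mod_nonneg a (by omega)
  have hmb : 0 ≤ PySem.Int.mod b 10 := PySem.Int.mod_nonneg b (by omega)
  simp only [moveA, List.foldl_cons, List.foldl_nil] at h
  generalize hp : PySem.Int.floordiv a 10 = p at h hda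
  generalize hq : PySem.Int.mod a 10 = q at h hma
  generalize hr : PySem.Int.floordiv b 10 = r at h hdb
  generalize hs : PySem.Int.mod b 10 = s at h hmb
  simp only [step] at h
  simp only [List.mem_append, List.nil_append, List.mem_ite_nil_right,
    List.mem_singleton, Prod.mk.injEq] at h
  omega

theorem mem_moveA_measure {a b x y : Int} (ha : 0 ≤ a) (hb : 0 ≤ b)
    (h : (x, y) ∈ moveA a b) : (x + y).toNat < (a + b).toNat := by
  have h1 := mem_moveA h
  have h2 := mem_moveA_nonneg ha hb h
  omega

theorem childrenB_eq_moveA (a b : Int) : childrenB a b = moveA a b := by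
  simp only [childrenB, moveA, List.foldl_cons, List.foldl_nil,
    List.flatMap_cons, List.flatMap_nil, List.append_nil]
  generalize PySem.Int.floordiv a 10 = p
  generalize PySem.Int.mod a 10 = q
  generalize PySem.Int.floordiv b 10 = r
  generalize PySem.Int.mod b 10 = s
  simp only [step]
  simp [List.append_assoc]

-- fuel irrelevance: any two sufficient fuels give the same value on nonnegative states.
theorem fFuel_congr : ∀ (n : Nat) (a b : Int) (k k' : Nat), 0 ≤ a → 0 ≤ b →
    (a + b).toNat < k → (a + b).toNat < k' → (a + b).toNat ≤ n →
    fFuel k a b = fFuel k' a b := by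
  intro n
  induction n with
  | zero =>
    intro a b k k' ha hb hk hk' hn
    obtain ⟨k, rfl⟩ : ∃ m, k = m + 1 := ⟨k - 1, by omega⟩
    obtain ⟨k', rfl⟩ : ∃ m, k' = m + 1 := ⟨k' - 1, by omega⟩
    simp only [fFuel]
    have : moveA a b = [] := by
      rcases h : moveA a b with _ | ⟨⟨x, y⟩, rest⟩
      · rfl
      · exfalso
        have hm : (x, y) ∈ moveA a b := by rw [h]; simp
        have := mem_moveA_measure ha hb hm
        omega
    simp [this]
  | succ n ih =>
    intro a b k k' ha hb hk hk' hn
    obtain ⟨k, rfl⟩ : ∃ m, k = m + 1 := ⟨k - 1, by omega⟩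
    obtain ⟨k', rfl⟩ : ∃ m, k' = m + 1 := ⟨k' - 1, by omega⟩
    simp only [fFuel]
    have hmap : (moveA a b).map (fun e => fFuel k e.1 e.2) =
        (moveA a b).map (fun e => fFuel k' e.1 e.2) := by
      apply List.map_congr_left
      intro e he
      obtain ⟨x, y⟩ := e
      have h1 := mem_moveA_nonneg ha hb he
      have h2 := mem_moveA_measure ha hb he
      exact ih x y k k' h1.1 h1.2 (by omega) (by omega) (by omega)
    rw [hmap]

-- fFuel with the canonical fuel, i.e. f, seen as one unfolding step.
theorem f_eq_step (a b : Int) (k : Nat) (ha : 0 ≤ a) (hb : 0 ≤ b)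
    (hk : (a + b).toNat < k) : fFuel k a b = f a b := by
  exact fFuel_congr ((a + b).toNat) a b k ((a + b).toNat + 1) ha hb hk (by omega) (by omega)

-- The memo invariant: every stored value is the true game value of its key.
def MemoInv (m : PySem.Dict (Int × Int) Int) : Prop :=
  ∀ (p : Int × Int) (v : Int), PySem.Dict.get? m p = some v → v = f p.1 p.2

theorem MemoInv_empty : MemoInv PySem.Dict.empty := by
  intro p v h
  simp [PySem.Dict.get?_empty] at h

theorem MemoInv_insert {m : PySem.Dict (Int × Int) Int} {a b r : Int}
    (hm : MemoInv m) (hr : r = f a b) : MemoInv (PySem.Dict.insert m (a, b) r) := by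
  intro p v h
  rw [PySem.Dict.get?_insert] at h
  by_cases hp : p = (a, b)
  · simp [hp] at h; subst hp; simp [← h, hr]
  · rw [if_neg hp] at h
    exact hm p v h

-- Correctness of the inner fold over the children (memo threaded left to right).
theorem valueB_fold (k : Nat)
    (IH : ∀ (x y : Int) (m : PySem.Dict (Int × Int) Int), 0 ≤ x → 0 ≤ y →
      (x + y).toNat < k → MemoInv m →
      (valueB k x y m).1 = f x y ∧ MemoInv (valueB k x y m).2) :
    ∀ (kids : List (Int × Int)) (acc : List Int) (m : PySem.Dict (Int × Int) Int),
      (∀ e ∈ kids, 0 ≤ e.1 ∧ 0 ≤ e.2 ∧ (e.1 + e.2).toNat < k) → MemoInv m →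
      (kids.foldl (fun (acc : List Int × PySem.Dict (Int × Int) Int) e =>
          let r := valueB k e.1 e.2 acc.2
          (acc.1 ++ [r.1], r.2)) (acc, m)).1
        = acc ++ kids.map (fun e => f e.1 e.2) ∧
      MemoInv (kids.foldl (fun (acc : List Int × PySem.Dict (Int × Int) Int) e =>
          let r := valueB k e.1 e.2 acc.2
          (acc.1 ++ [r.1], r.2)) (acc, m)).2 := by
  intro kids
  induction kids with
  | nil => intro acc m _ hm; simpa using hm
  | cons e rest ih =>
    intro acc m hk hm
    have he := hk e (by simp)
    have hv := IH e.1 e.2 m he.1 he.2.1 he.2.2 hm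
    simp only [List.foldl_cons]
    have := ih (acc ++ [(valueB k e.1 e.2 m).1]) (valueB k e.1 e.2 m).2
      (fun x hx => hk x (by simp [hx])) hv.2
    rw [this.1]
    refine ⟨?_, this.2⟩
    simp [hv.1]

-- Main lemma: the memoized recursion computes f and preserves the invariant.
theorem valueB_correct : ∀ (k : Nat) (a b : Int) (m : PySem.Dict (Int × Int) Int),
    0 ≤ a → 0 ≤ b → (a + b).toNat < k → MemoInv m →
    (valueB k a b m).1 = f a b ∧ MemoInv (valueB k a b m).2 := by
  intro k
  induction k with
  | zero => intro a b m _ _ hk _; omega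
  | succ k ih =>
    intro a b m ha hb hk hm
    simp only [valueB]
    rcases hget : PySem.Dict.get? m (a, b) with _ | v
    · -- memo miss
      simp only
      have hkids : childrenB a b = moveA a b := childrenB_eq_moveA a b
      by_cases hnil : childrenB a b = []
      · -- no moves
        have hA : f a b = 0 := by
          show fFuel ((a + b).toNat + 1) a b = 0
          simp only [fFuel]
          rw [← hkids, hnil]
          simp
        simp only [hnil]
        exact ⟨hA.symm, MemoInv_insert hm hA.symm⟩
      · -- some moves: the fold computes the children's values
        have hbound : ∀ e ∈ childrenB a b, 0 ≤ e.1 ∧ 0 ≤ e.2 ∧ (e.1 + e.2).toNat < k := by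
          intro e he
          rw [hkids] at he
          obtain ⟨x, y⟩ := e
          have h1 := mem_moveA_nonneg ha hb he
          have h2 := mem_moveA_measure ha hb he
          exact ⟨h1.1, h1.2, by omega⟩
        have hfold := valueB_fold k ih (childrenB a b) [] m hbound hm
        simp only [if_neg hnil]
        rw [hfold.1]
        simp only [List.nil_append]
        -- f a b unfolds to the same computation on the same child values
        have hA : f a b =
            (let mas := (childrenB a b).map (fun e => f e.1 e.2)
             if mas.all (fun v => decide (v > 0)) then
               -((PySem.List.max? mas (fun v => v)).getD 0) - 1
             else
               -((PySem.List.max? (mas.filter (fun v => decide (v ≤ 0))) (fun v => v)).getD 0) + 1) := by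
          show fFuel ((a + b).toNat + 1) a b = _
          simp only [fFuel]
          rw [← hkids]
          rw [if_neg (by simpa using fun h => hnil (List.eq_nil_of_length_eq_zero h))]
          have : (childrenB a b).map (fun e => fFuel ((a + b).toNat) e.1 e.2) =
              (childrenB a b).map (fun e => f e.1 e.2) := by
            apply List.map_congr_left
            intro e he
            have h1 := hbound e he
            have h2 : (e.1 + e.2).toNat < (a + b).toNat := by
              rw [hkids] at he
              obtain ⟨x, y⟩ := e
              exact mem_moveA_measure ha hb he
            exact f_eq_step e.1 e.2 _ h1.1 h1.2.1 h2
          rw [this]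
        set vals := (childrenB a b).map (fun e => f e.1 e.2) with hvals
        have hbranch :
            (if vals.filter (fun v => decide (v ≤ 0)) ≠ [] then
               1 - (PySem.List.max? (vals.filter (fun v => decide (v ≤ 0))) (fun v => v)).getD 0
             else -1 - (PySem.List.max? vals (fun v => v)).getD 0)
            = f a b := by
          rw [hA]
          simp only
          by_cases hall : vals.all (fun v => decide (v > 0))
          · have hfil : vals.filter (fun v => decide (v ≤ 0)) = [] := by
              rw [List.filter_eq_nil_iff]
              intro x hx
              have := List.all_eq_true.mp hall x hx
              simp_all
            rw [if_neg (by simp [hfil]), if_pos hall]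
            ring
          · have hfil : vals.filter (fun v => decide (v ≤ 0)) ≠ [] := by
              intro hcon
              apply hall
              rw [List.all_eq_true]
              intro x hx
              rw [List.filter_eq_nil_iff] at hcon
              have := hcon x hx
              simp_all
            rw [if_pos hfil, if_neg hall]
            ring
        rw [hbranch]
        exact ⟨rfl, MemoInv_insert hfold.2 rfl⟩
    · -- memo hit
      simp only
      exact ⟨hm (a, b) v hget, hm⟩

-- ===== VERDICT (by name: the statement is the Claim_ definition above) =====
theorem f_spec : Claim_equal_f := by
  intro a b _ hpre
  unfold Spec_f f_alt
  have := valueB_correct ((a + b).toNat + 1) a b PySem.Dict.empty hpre.1 hpre.2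
    (by omega) MemoInv_empty
  exact this.1.symm
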